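-- pv_equiv track=rewrite | github.com/TK-Turtle/deck_shuffle | shuffle.py | deal
-- ===== SOURCE A (Python) =====
-- def deal(deck,n):#デッキを何枚の束に分けるかを指定
--     t=0
--     decknum=len(deck)
--     ex_n=int(decknum/n)+1
--     dealstack=[[] for i in range(n)]
--     for i in range(decknum):
--         dealstack[t].append(deck[i])
--         t=(t+1)
--         if t==n:
--             t=0
--     deck=[]
--     for j in range(len(dealstack)):
--         for k in reversed(dealstack[j]):
--             deck.append(k)
--
--     return deck
-- ===== SOURCE B (Python) =====
-- def deal(deck, n):
--     # Each pile j is exactly the elements at indices j, j+n, j+2n, ...: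
--     # read them directly with a strided scan instead of distributing round-robin.
--     out = []
--     for j in range(n):
--         pile = []
--         i = j
--         while i < len(deck):
--             pile.append(deck[i])
--             i += n
--         out.extend(reversed(pile))
--     return out
-- ===== Notes on version B (the rewrite author's own statement) =====
-- stated objective: alternative
-- what changed: B drops A's round-robin distribution into a list of growing stacks entirely: for each pile index j it reads the pile directly as the strided subsequence deck[j], deck[j+n], ... and appends it reversed, so no per-element counter or intermediate list-of-stacks is maintained.
import Mathlib
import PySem

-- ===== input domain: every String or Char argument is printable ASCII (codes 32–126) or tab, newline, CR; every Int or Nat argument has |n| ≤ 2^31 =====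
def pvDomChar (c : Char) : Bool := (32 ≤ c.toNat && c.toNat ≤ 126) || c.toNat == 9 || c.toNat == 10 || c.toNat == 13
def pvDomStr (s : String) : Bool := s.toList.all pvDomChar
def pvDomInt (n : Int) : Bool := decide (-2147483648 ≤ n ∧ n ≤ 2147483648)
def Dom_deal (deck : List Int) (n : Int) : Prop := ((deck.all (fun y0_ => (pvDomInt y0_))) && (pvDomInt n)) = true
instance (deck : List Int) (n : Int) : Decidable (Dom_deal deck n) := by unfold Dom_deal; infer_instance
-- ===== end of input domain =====

-- B replaces A's round-robin distribution into growing stacks by reading each pile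
-- directly as a strided subsequence of the deck (alternative decomposition, same cost).


-- ===== PORT A =====
-- literal transliteration of A: distribute deck round-robin into n stacks via a counter
-- t, then concatenate the stacks each reversed.  A's line `ex_n = int(decknum/n)+1` is
-- unused by A; it raises ZeroDivisionError iff n = 0, which Pre_deal excludes (as it
-- excludes the IndexError raised when n < 0 and deck ≠ []).
def deal (deck : List Int) (n : Int) : List Int :=
  let dealstack : List (List Int) := List.replicate n.toNat []   -- [[] for i in range(n)]
  let final := deck.foldl
    (fun (st : List (List Int) × Int) x =>
      (st.1.set st.2.toNat ((st.1.getD st.2.toNat []) ++ [x]),   -- dealstack[t].append(deck[i])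
       if st.2 + 1 = n then 0 else st.2 + 1))                    -- t = t+1; if t == n: t = 0
    (dealstack, (0 : Int))
  final.1.foldl (fun acc s => acc ++ s.reverse) []               -- for j: for k in reversed(...)

-- ===== PORT B =====
-- B's while loop `i = j; while i < len(deck): pile.append(deck[i]); i += n`;
-- s = n - 1, so the step s+1 equals n on every executed iteration (there j < n forces n ≥ 1)
def strideGet (deck : List Int) (i s : Nat) : List Int :=
  if h : i < deck.length then deck[i] :: strideGet deck (i + (s + 1)) s else []
termination_by deck.length - i

def deal_alt (deck : List Int) (n : Int) : List Int :=
  (PySem.List.pyRange 0 n 1).foldl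
    (fun out j => out ++ (strideGet deck j.toNat (n - 1).toNat).reverse) []

-- ===== PRECONDITION & SPEC =====
-- Pre_ excludes exactly the inputs where the Python A raises: n = 0 (ZeroDivisionError
-- in `int(decknum/n)`) and n < 0 with a non-empty deck (IndexError: no stacks exist).
def Pre_deal (deck : List Int) (n : Int) : Prop := 0 < n ∨ (n < 0 ∧ deck = [])
instance (deck : List Int) (n : Int) : Decidable (Pre_deal deck n) := by unfold Pre_deal; infer_instance
def pvWitness_deal : List Int × Int := ([1, 2, 3, 4, 5], 2)

def Spec_deal (deck : List Int) (n : Int) (out : List Int) : Prop := out = deal_alt deck n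
instance (deck : List Int) (n : Int) (out : List Int) : Decidable (Spec_deal deck n out) := by unfold Spec_deal; infer_instance

-- ===== CLAIM (what is proved, stated in full; the proofs are below) =====
def Claim_equal_deal : Prop := ∀ (deck : List Int) (n : Int), Dom_deal deck n → Pre_deal deck n → Spec_deal deck n (deal deck n)

-- ===== LEMMAS AND PROOFS =====

theorem strideGet_cons (x : Int) (xs : List Int) (s : Nat) (i : Nat) :
    strideGet (x :: xs) (i + 1) s = strideGet xs i s := by
  fun_induction strideGet xs i s with
  | case1 i h ih =>
      conv_lhs => rw [strideGet]
      conv_rhs => rw [strideGet]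
      simp only [List.length_cons, dif_pos (by omega : i + 1 < xs.length + 1),
        List.getElem_cons_succ]
      rw [show i + 1 + (s + 1) = i + (s + 1) + 1 from by omega, ih]
      congr 1
      rw [strideGet]
  | case2 i h =>
      rw [strideGet, strideGet]
      simp
      omega

-- groups m j xs t: the elements of xs that A's round-robin counter (current value t,
-- modulus m) assigns to stack j, in order.
def groups (m j : Nat) : List Int → Nat → List Int
  | [], _ => []
  | x :: xs, t => (if t = j then [x] else []) ++ groups m j xs (if t + 1 = m then 0 else t + 1)

-- the elements assigned to stack j are exactly the strided read starting at the
-- distance from t to the next time the counter hits j.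
theorem groups_eq_stride (m j : Nat) (hm : 0 < m) (hj : j < m) (xs : List Int) :
    ∀ t : Nat, t < m →
      groups m j xs t = strideGet xs (if t ≤ j then j - t else j + m - t) (m - 1) := by
  induction xs with
  | nil => intro t ht; rw [groups, strideGet]; simp
  | cons x xs ih =>
      intro t ht
      rw [groups]
      by_cases hteq : t = j
      · subst hteq
        rw [if_pos (le_refl t), Nat.sub_self, if_pos rfl]
        rw [strideGet]
        simp only [List.length_cons, dif_pos (by omega : 0 < xs.length + 1),
          List.getElem_cons_zero, List.singleton_append]
        congr 1
        by_cases hw : t + 1 = m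
        · rw [if_pos hw, ih 0 hm, if_pos (Nat.zero_le t), Nat.sub_zero]
          rw [show 0 + (m - 1 + 1) = t + 1 from by omega, strideGet_cons]
        · rw [if_neg hw, ih (t + 1) (by omega), if_neg (by omega : ¬ (t + 1 ≤ t))]
          rw [show 0 + (m - 1 + 1) = (t + m - (t + 1)) + 1 from by omega, strideGet_cons]
      · rw [if_neg hteq, List.nil_append]
        by_cases hw : t + 1 = m
        · rw [if_pos hw, ih 0 hm, if_pos (Nat.zero_le j), Nat.sub_zero]
          have ht' : ¬ t ≤ j := by omega
          rw [if_neg ht', show j + m - t = j + 1 from by omega, strideGet_cons]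
        · rw [if_neg hw, ih (t + 1) (by omega)]
          by_cases hle : t ≤ j
          · have h1 : t < j := by omega
            rw [if_pos hle, if_pos (by omega : t + 1 ≤ j),
              show j - t = (j - (t + 1)) + 1 from by omega, strideGet_cons]
          · rw [if_neg hle, if_neg (by omega : ¬ t + 1 ≤ j),
              show j + m - t = (j + m - (t + 1)) + 1 from by omega, strideGet_cons]

-- invariant of A's distribution loop: stack j accumulates groups m j
theorem distrib_inv (n : Int) (m : Nat) (hn : (m : Int) = n) (hm : 0 < m) (xs : List Int) :
    ∀ (st : List (List Int)) (t : Nat), st.length = m → t < m →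
      (xs.foldl (fun (st : List (List Int) × Int) x =>
          (st.1.set st.2.toNat ((st.1.getD st.2.toNat []) ++ [x]),
           if st.2 + 1 = n then 0 else st.2 + 1)) (st, (t : Int))).1.length = m ∧
      ∀ j, j < m →
        ((xs.foldl (fun (st : List (List Int) × Int) x =>
            (st.1.set st.2.toNat ((st.1.getD st.2.toNat []) ++ [x]),
             if st.2 + 1 = n then 0 else st.2 + 1)) (st, (t : Int))).1).getD j []
          = st.getD j [] ++ groups m j xs t := by
  induction xs with
  | nil =>
      intro st t hst ht
      exact ⟨hst, fun j hj => by rw [groups]; simp⟩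
  | cons x xs ih =>
      intro st t hst ht
      rw [List.foldl_cons]
      simp only [Int.toNat_natCast]
      have hcond : ((t : Int) + 1 = n) ↔ (t + 1 = m) := by omega
      set t' : Nat := if t + 1 = m then 0 else t + 1 with ht'
      have hcast : (if (t : Int) + 1 = n then (0 : Int) else (t : Int) + 1) = (t' : Int) := by
        rw [ht']; split_ifs with h1 h2 <;> push_cast <;> omega
      rw [hcast]
      have hst' : (st.set t (st.getD t [] ++ [x])).length = m := by simpa using hst
      have ht'lt : t' < m := by rw [ht']; split_ifs <;> omega
      obtain ⟨hl, hg⟩ := ih (st.set t (st.getD t [] ++ [x])) t' hst' ht'lt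
      refine ⟨hl, fun j hj => ?_⟩
      rw [hg j hj, groups]
      have hset : (st.set t (st.getD t [] ++ [x])).getD j []
          = st.getD j [] ++ (if t = j then [x] else []) := by
        by_cases hje : t = j
        · subst hje
          simp [List.getD, hst, ht]
        · simp [List.getD, hje]
      rw [hset, List.append_assoc]

theorem foldl_append_flatten {α : Type} (f : α → List Int) :
    ∀ (L : List α) (acc : List Int),
      L.foldl (fun a y => a ++ f y) acc = acc ++ (L.map f).flatten := by
  intro L
  induction L with
  | nil => simp
  | cons y L ih => intro acc; simp [ih, List.append_assoc]

theorem getD_eq_getElem' (l : List (List Int)) (i : Nat) (h : i < l.length) :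
    l.getD i [] = l[i] := by
  simp [List.getD, List.getElem?_eq_getElem h]

-- ===== VERDICT (by name: the statement is the Claim_ definition above) =====
theorem deal_spec : Claim_equal_deal := by
  intro deck n _ hpre
  unfold Spec_deal deal deal_alt
  rcases hpre with hpos | ⟨hneg, hnil⟩
  · -- 0 < n
    have hm : 0 < n.toNat := by omega
    have hn : ((n.toNat : Nat) : Int) = n := by omega
    have hinit : (List.replicate n.toNat ([] : List Int)).length = n.toNat := by simp
    have hdist := distrib_inv n n.toNat hn hm deck (List.replicate n.toNat []) 0 hinit hm
    push_cast at hdist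
    obtain ⟨hl, hg⟩ := hdist
    rw [foldl_append_flatten, foldl_append_flatten]
    simp only [List.nil_append]
    congr 1
    rw [PySem.List.pyRange_one 0 n, List.map_map]
    apply List.ext_getElem
    · simp only [List.length_map, List.length_range, hl]; omega
    · intro i h1 h2
      have hi : i < n.toNat := by simpa only [List.length_map, hl] using h1
      simp only [List.getElem_map, Function.comp_apply, List.getElem_range]
      rw [← getD_eq_getElem' _ i (by omega), hg i hi]
      have hrepl : (List.replicate n.toNat ([] : List Int)).getD i [] = [] := by
        simp [List.getD, hi]
      rw [hrepl, List.nil_append]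
      rw [groups_eq_stride n.toNat i hm hi deck 0 hm]
      simp only [Nat.zero_le, if_pos, Nat.sub_zero]
      have e1 : ((0 : Int) + (i : Int)).toNat = i := by omega
      have e2 : (n - 1).toNat = n.toNat - 1 := by omega
      rw [e1, e2]
  · -- n < 0 and deck = []
    subst hnil
    rw [PySem.List.pyRange_one_eq_nil (by omega : n ≤ 0)]
    simp
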